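-- pv_equiv track=rewrite | github.com/dtsong/trainerlab | apps/api/src/clients/rk9.py | _parse_location_text
-- ===== SOURCE A (Python) =====
-- def _parse_location_text(
--     text: str,
-- ) -> tuple[str | None, str | None]:
--     """Parse city and country from a location string.
--
--     Handles formats like:
--     - "Sacramento, CA, US"
--     - "London, United Kingdom"
--     - "Sao Paulo, Brazil"
--
--     Args:
--         text: Location string.
--
--     Returns:
--         Tuple of (city, country).
--     """
--     if not text:
--         return None, None
--
--     parts = [p.strip() for p in text.split(",")]
--     city = parts[0] if parts else None
--
--     # Last part is typically country or state abbreviation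
--     country = parts[-1] if len(parts) >= 2 else None
--
--     return city, country
-- ===== SOURCE B (Python) =====
-- def _parse_location_text(
--     text: str,
-- ) -> tuple[str | None, str | None]:
--     """Parse city and country from a location string without materializing a parts list."""
--     if not text:
--         return None, None
--     city = text.partition(",")[0].strip()
--     _before, sep, after = text.rpartition(",")
--     country = after.strip() if sep else None
--     return city, country
-- ===== Notes on version B (the rewrite author's own statement) =====
-- stated objective: idiomatic
-- what changed: Replaces the split-into-a-list-and-index approach by partition/rpartition: the city is the stripped segment before the first comma and the country the stripped segment after the last comma (present iff a comma occurs), so no intermediate list of stripped parts is built.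
import Mathlib
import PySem

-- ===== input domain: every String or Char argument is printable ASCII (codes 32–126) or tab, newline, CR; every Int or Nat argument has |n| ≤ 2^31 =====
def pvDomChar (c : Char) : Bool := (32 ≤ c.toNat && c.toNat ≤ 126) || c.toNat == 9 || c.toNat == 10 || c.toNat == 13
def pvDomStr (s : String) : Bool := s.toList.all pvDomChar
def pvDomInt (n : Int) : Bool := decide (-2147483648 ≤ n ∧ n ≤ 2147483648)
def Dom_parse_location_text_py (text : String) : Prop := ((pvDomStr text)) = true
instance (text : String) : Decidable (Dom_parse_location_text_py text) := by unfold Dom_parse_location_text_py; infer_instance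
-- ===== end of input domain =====

-- B parses the location with partition/rpartition (prefix before the first comma, suffix after the
-- last comma) instead of splitting into a stripped list and indexing it; same cost, no parts list.

-- ===== PORT A =====
def parse_location_text_py (text : String) : Option String × Option String :=
  if text = "" then (none, none)  -- `if not text`
  else
    -- parts = [p.strip() for p in text.split(",")]
    let parts : List String :=
      (PySem.Chars.splitOn text.toList [',']).map (fun p => String.ofList (PySem.Chars.strip p))
    -- city = parts[0] if parts else None
    let city : Option String := parts.head?
    -- country = parts[-1] if len(parts) >= 2 else None
    let country : Option String :=
      if 2 ≤ parts.length then PySem.List.pyGet? parts (-1) else none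
    (city, country)

-- ===== PORT B =====
def parse_location_text_py_alt (text : String) : Option String × Option String :=
  if text = "" then (none, none)
  else
    let cs := text.toList
    -- text.partition(",")[0] is the prefix of text before the first ',' (all of text if none)
    let city : String := String.ofList (PySem.Chars.strip (cs.takeWhile (· ≠ ',')))
    -- text.rpartition(","): sep is nonempty iff ',' occurs; after = suffix behind the last ','
    let country : Option String :=
      if ',' ∈ cs then
        some (String.ofList (PySem.Chars.strip ((cs.reverse.takeWhile (· ≠ ',')).reverse)))
      else none
    (some city, country)

-- ===== PRECONDITION & SPEC =====
def Spec_parse_location_text_py (text : String) (out : Option String × Option String) : Prop := out = parse_location_text_py_alt text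
instance (text : String) (out : Option String × Option String) : Decidable (Spec_parse_location_text_py text out) := by unfold Spec_parse_location_text_py; infer_instance

-- ===== CLAIM (what is proved, stated in full; the proofs are below) =====
def Claim_equal_parse_location_text_py : Prop := ∀ (text : String), Dom_parse_location_text_py text → Spec_parse_location_text_py text (parse_location_text_py text)

-- ===== LEMMAS AND PROOFS =====

/-- Structural view of `PySem.Chars.splitOn cs [r]`: `cur` is the (reversed) current piece. -/
def split1 (r : Char) : List Char → List Char → List (List Char)
  | [], cur => [cur.reverse]
  | c :: rest, cur => if c = r then cur.reverse :: split1 r rest [] else split1 r rest (c :: cur)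

theorem go_eq (r : Char) : ∀ (fuel : Nat) (l cur : List Char) (acc : List (List Char)), l.length < fuel →
    PySem.Chars.splitOn.go [r] fuel l cur acc = acc.reverse ++ split1 r l cur := by
  intro fuel
  induction fuel with
  | zero => intro l cur acc h; omega
  | succ n ih =>
    intro l cur acc h
    cases l with
    | nil => rw [PySem.Chars.splitOn.go.eq_def]; simp [split1]
    | cons c rest =>
      rw [PySem.Chars.splitOn.go.eq_def]
      simp only [List.isPrefixOf, Bool.and_true, split1]
      by_cases hc : c = r
      · have hb : (r == c) = true := by simp [hc]
        simp only [hb, if_true, List.length_cons, List.length_nil, List.drop_succ_cons,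
          List.drop_zero]
        rw [ih rest [] (cur.reverse :: acc) (by simp at h ⊢; omega)]
        simp [hc]
      · have hb : (r == c) = false := by simp [Ne.symm hc]
        simp only [hb, if_false, Bool.false_eq_true]
        rw [if_neg hc, ih rest (c :: cur) acc (by simp at h ⊢; omega)]

theorem splitOn_eq (r : Char) (cs : List Char) : PySem.Chars.splitOn cs [r] = split1 r cs [] := by
  rw [PySem.Chars.splitOn, go_eq r (cs.length + 1) cs [] [] (by omega)]
  simp

theorem split1_head? (r : Char) (cs : List Char) : ∀ cur,
    (split1 r cs cur).head? = some (cur.reverse ++ cs.takeWhile (· ≠ r)) := by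
  induction cs with
  | nil => intro cur; simp [split1]
  | cons c rest ih =>
    intro cur
    by_cases hc : c = r
    · simp [split1, hc]
    · simp [split1, hc, ih (c :: cur)]

theorem split1_ne_nil (r : Char) (cs cur : List Char) : split1 r cs cur ≠ [] := by
  intro h
  have := split1_head? r cs cur
  rw [h] at this
  simp at this

theorem split1_two_le (r : Char) (cs : List Char) : ∀ cur,
    2 ≤ (split1 r cs cur).length ↔ r ∈ cs := by
  induction cs with
  | nil => intro cur; simp [split1]
  | cons c rest ih =>
    intro cur
    by_cases hc : c = r
    · rw [split1, if_pos hc]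
      have := List.length_pos_iff.mpr (split1_ne_nil r rest [])
      constructor
      · intro _; simp [hc]
      · intro _; simp only [List.length_cons]; omega
    · simp only [split1, if_neg hc, List.mem_cons]
      rw [ih (c :: cur)]
      have : ¬ r = c := fun h => hc h.symm
      simp [this]

theorem getLast?_cons_ne {α : Type} (a : α) (l : List α) (h : l ≠ []) :
    (a :: l).getLast? = l.getLast? := by
  cases l with
  | nil => simp at h
  | cons b m => rfl

theorem takeWhile_length_ne (r : Char) (l : List Char) (hr : r ∈ l) :
    (l.takeWhile (· ≠ r)).length ≠ l.length := by
  intro hlen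
  have heq : l.takeWhile (· ≠ r) = l := (List.takeWhile_prefix _).eq_of_length hlen
  have := List.mem_takeWhile_imp (p := fun x => decide (x ≠ r)) (l := l) (x := r)
    (by rw [heq]; exact hr)
  simp at this

theorem split1_getLast? (r : Char) (cs : List Char) : ∀ cur,
    (split1 r cs cur).getLast? =
      some (if r ∈ cs then (cs.reverse.takeWhile (· ≠ r)).reverse else cur.reverse ++ cs) := by
  induction cs with
  | nil => intro cur; simp [split1]
  | cons c rest ih =>
    intro cur
    by_cases hc : c = r
    · rw [split1, if_pos hc, getLast?_cons_ne _ _ (split1_ne_nil r rest []), ih []]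
      by_cases hr : r ∈ rest
      · have hlen := takeWhile_length_ne r rest.reverse (by simpa using hr)
        simp only [hr, if_true, if_pos (List.mem_cons_of_mem c hr)]
        rw [List.reverse_cons, List.takeWhile_append, if_neg hlen]
      · have : rest.reverse.takeWhile (· ≠ r) = rest.reverse := by
          apply List.takeWhile_eq_self_iff.mpr
          intro x hx
          simp only [decide_eq_true_eq]
          intro hxr; subst hxr; exact hr (by simpa using hx)
        simp only [hr, if_false, List.reverse_nil, List.nil_append,
          if_pos (by simp [hc] : r ∈ c :: rest)]
        rw [List.reverse_cons, List.takeWhile_append, if_pos (by rw [this])]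
        simp [hc]
    · rw [split1, if_neg hc, ih (c :: cur)]
      have hrc : ¬ r = c := fun h => hc h.symm
      by_cases hr : r ∈ rest
      · have hlen := takeWhile_length_ne r rest.reverse (by simpa using hr)
        simp only [hr, if_true, if_pos (List.mem_cons_of_mem c hr)]
        rw [List.reverse_cons, List.takeWhile_append, if_neg hlen]
      · have hmem : ¬ r ∈ c :: rest := by simp [hrc, hr]
        simp [hr, hmem]
  
theorem pyGet?_neg_one {α : Type} (xs : List α) (h : xs ≠ []) :
    PySem.List.pyGet? xs (-1) = xs.getLast? := by
  have hn : 1 ≤ xs.length := List.length_pos_iff.mpr h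
  simp only [PySem.List.pyGet?, PySem.List.pyIdx?]
  rw [if_neg (by omega), if_pos (by omega)]
  rw [List.getLast?_eq_getElem?]
  rfl

-- ===== VERDICT (by name: the statement is the Claim_ definition above) =====
theorem parse_location_text_py_spec : Claim_equal_parse_location_text_py := by
  intro text _
  unfold Spec_parse_location_text_py parse_location_text_py parse_location_text_py_alt
  by_cases ht : text = ""
  · simp [ht]
  · simp only [if_neg ht]
    rw [splitOn_eq]
    simp only [Prod.mk.injEq]
    refine ⟨?_, ?_⟩
    · -- city
      rw [List.head?_map, split1_head? ',' text.toList []]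
      simp
    · -- country
      by_cases hr : ',' ∈ text.toList
      · rw [if_pos (by rw [List.length_map]; exact (split1_two_le ',' text.toList []).mpr hr),
          if_pos hr,
          pyGet?_neg_one _ (by simp [split1_ne_nil]),
          List.getLast?_map, split1_getLast? ',' text.toList []]
        simp [hr]
      · have h2 : ¬ 2 ≤ (split1 ',' text.toList []).length :=
          fun h => hr ((split1_two_le ',' text.toList []).mp h)
        rw [if_neg (by rw [List.length_map]; exact h2), if_neg hr]
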